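-- pv_equiv track=rewrite | github.com/pabloschwarzenberg/grader | tema4_ej3/tema4_ej3_4622b6cf22b537d3eeec8838838f9feb.py | traducir_a_jerigonzo
-- ===== SOURCE A (Python) =====
-- def traducir_a_jerigonzo(texto):
--     jerigonzo = ""
--     vocales = "aeiouAEIOU"
--
--     for letra in texto:
--         jerigonzo += letra
--         if letra in vocales:
--             jerigonzo += "p" + letra.lower()
--
--     return jerigonzo
-- ===== SOURCE B (Python) =====
-- def traducir_a_jerigonzo(texto):
--     vocales = "aeiouAEIOU"
--     piezas = []
--     inicio = 0
--     for i, letra in enumerate(texto):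
--         if letra in vocales:
--             piezas.append(texto[inicio:i + 1])
--             piezas.append("p" + letra.lower())
--             inicio = i + 1
--     piezas.append(texto[inicio:])
--     return "".join(piezas)
-- ===== Notes on version B (the rewrite author's own statement) =====
-- stated objective: alternative
-- what changed: B scans for vowel positions and assembles the output by joining slices of the input that end at each vowel with the inserted lowercase syllables, instead of A's per-character accumulation with repeated string concatenation.
import Mathlib
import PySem

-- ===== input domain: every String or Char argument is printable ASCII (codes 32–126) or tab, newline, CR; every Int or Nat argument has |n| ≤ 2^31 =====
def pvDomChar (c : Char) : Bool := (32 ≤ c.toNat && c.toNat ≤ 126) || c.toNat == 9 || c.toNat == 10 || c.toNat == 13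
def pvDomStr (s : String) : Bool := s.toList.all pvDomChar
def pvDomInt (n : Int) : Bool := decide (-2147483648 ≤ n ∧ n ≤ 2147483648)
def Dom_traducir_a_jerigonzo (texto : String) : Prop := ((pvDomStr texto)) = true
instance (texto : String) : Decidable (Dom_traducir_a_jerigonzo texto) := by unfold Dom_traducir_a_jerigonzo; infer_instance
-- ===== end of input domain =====

-- B assembles the result from slices of the input between vowel positions joined with the
-- inserted syllables, instead of A's per-character string accumulation (alternative).

-- ===== PORT A =====
-- vocales = "aeiouAEIOU" (its list of characters; 'letra in vocales' = char membership)
def pvVocales : List Char := ['a', 'e', 'i', 'o', 'u', 'A', 'E', 'I', 'O', 'U']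

-- loop body: jerigonzo += letra; if letra in vocales: jerigonzo += "p" + letra.lower()
def pvStepA (acc : List Char) (letra : Char) : List Char :=
  let acc := acc ++ [letra]
  if letra ∈ pvVocales then acc ++ ('p' :: [PySem.Chars.lowerChar letra]) else acc

def traducir_a_jerigonzo (texto : String) : String :=
  String.ofList (texto.toList.foldl pvStepA [])

-- ===== PORT B =====
-- loop body over enumerate(texto): if letra in vocales:
--   piezas.append(texto[inicio:i+1]); piezas.append("p"+letra.lower()); inicio = i+1
def pvStepB (l : List Char) (st : List (List Char) × Int) (p : Int × Char) : List (List Char) × Int :=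
  if p.2 ∈ pvVocales then
    (st.1 ++ [PySem.List.slice l (some st.2) (some (p.1 + 1)),
              'p' :: [PySem.Chars.lowerChar p.2]], p.1 + 1)
  else st

-- piezas.append(texto[inicio:]); return "".join(piezas)
def traducir_a_jerigonzo_alt (texto : String) : String :=
  let l := texto.toList
  let r := (PySem.List.enumerate l 0).foldl (pvStepB l) ([], 0)
  String.ofList ((r.1 ++ [PySem.List.slice l (some r.2) none]).flatten)

-- ===== PRECONDITION & SPEC =====
def Spec_traducir_a_jerigonzo (texto : String) (out : String) : Prop := out = traducir_a_jerigonzo_alt texto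
instance (texto : String) (out : String) : Decidable (Spec_traducir_a_jerigonzo texto out) := by unfold Spec_traducir_a_jerigonzo; infer_instance

-- ===== CLAIM (what is proved, stated in full; the proofs are below) =====
def Claim_equal_traducir_a_jerigonzo : Prop := ∀ (texto : String), Dom_traducir_a_jerigonzo texto → Spec_traducir_a_jerigonzo texto (traducir_a_jerigonzo texto)

-- ===== LEMMAS AND PROOFS =====

-- per-character expansion both algorithms realise
def pvTranslate (c : Char) : List Char :=
  c :: (if c ∈ pvVocales then 'p' :: [PySem.Chars.lowerChar c] else [])

-- A's loop equals the per-character expansion flatMapped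
theorem foldl_stepA_eq (l : List Char) (acc : List Char) :
    l.foldl pvStepA acc = acc ++ l.flatMap pvTranslate := by
  induction l generalizing acc with
  | nil => simp
  | cons c t ih =>
    simp only [List.foldl, List.flatMap_cons, ih, pvStepA, pvTranslate]
    split_ifs <;> simp

-- B's invariant: folding the enumerated suffix starting at position k, with pending slice
-- start inicio ≤ k, then appending the final tail slice, yields the pieces so far plus the
-- pending chunk plus the expansion of the remaining suffix.
theorem foldl_stepB_inv (l : List Char) (rest : List Char) (k : Nat) (P : List (List Char))
    (inicio : Nat) (hrest : rest = l.drop k) (hik : inicio ≤ k) :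
    (let r := (PySem.List.enumerate rest (k : Int)).foldl (pvStepB l) (P, (inicio : Int));
     (r.1 ++ [PySem.List.slice l (some r.2) none]).flatten)
      = P.flatten ++ ((l.take k).drop inicio) ++ rest.flatMap pvTranslate := by
  induction rest generalizing k P inicio with
  | nil =>
    have hk : l.length ≤ k := by
      by_contra h
      push Not at h
      have := congrArg List.length hrest
      simp [List.length_drop] at this
      omega
    simp [PySem.List.enumerate, PySem.List.slice_from_natCast, List.take_of_length_le hk]
  | cons c rest' ih =>
    have hk : k < l.length := by
      by_contra h
      push Not at h
      rw [List.drop_eq_nil_of_le h] at hrest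
      simp at hrest
    have hc : l[k] = c := by
      have h0 : (l.drop k)[0]'(by simpa using hk) = c := by
        simp [← hrest]
      simpa using h0
    have hrest' : rest' = l.drop (k + 1) := by
      have := congrArg List.tail hrest
      simpa [List.tail_drop] using this
    have htake : l.take (k + 1) = l.take k ++ [c] := by
      rw [List.take_add_one]
      simp [List.getElem?_eq_getElem hk, hc]
    rw [PySem.List.enumerate_cons]
    simp only [List.foldl_cons, pvStepB]
    have hlen : inicio ≤ (l.take k).length := by
      simp [Nat.min_eq_left hk.le]; omega
    have hcast : (k : Int) + 1 = ((k + 1 : Nat) : Int) := by push_cast; ring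
    by_cases hv : c ∈ pvVocales
    · simp only [hv, if_pos, hcast]
      rw [ih (k + 1) _ (k + 1) hrest' (le_refl _)]
      have hslice : PySem.List.slice l (some (inicio : Int)) (some ((k : Int) + 1))
          = (l.take (k + 1)).drop inicio := by
        rw [hcast, PySem.List.slice_natCast]
        exact List.drop_take.symm
      have hnil : (List.take k l ++ [c]).drop (k + 1) = [] :=
        List.drop_eq_nil_of_le (by simp [Nat.min_eq_left hk.le])
      simp [hslice, htake, hnil, List.drop_append_of_le_length hlen, pvTranslate, hv]
    · simp only [hv, if_neg, not_false_iff, hcast]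
      rw [ih (k + 1) P inicio hrest' (by omega)]
      simp [htake, List.drop_append_of_le_length hlen, pvTranslate, hv]

-- ===== VERDICT (by name: the statement is the Claim_ definition above) =====
theorem traducir_a_jerigonzo_spec : Claim_equal_traducir_a_jerigonzo := by
  intro texto _
  unfold Spec_traducir_a_jerigonzo traducir_a_jerigonzo traducir_a_jerigonzo_alt
  rw [foldl_stepA_eq]
  have h := foldl_stepB_inv texto.toList texto.toList 0 [] 0 (by simp) (le_refl _)
  simp only [Int.ofNat_zero] at h
  simp [h]
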